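-- pv_equiv track=rewrite | github.com/michael-s-yao/recombination_checker | recombination_checker_vF.py | generate_substr_p
-- ===== SOURCE A (Python) =====
-- def generate_substr_p(string, start, length):
--     '''
--     The generate_substr_p function takes a string and generates a substring of
--     a specified length using a starting character position in the string.
--     Use this function to generate a substring of a plasmid.
--     ARGUMENTS:
--     string - template string that we want to take the substring of
--     start - the starting position of the substring within the string
--     length - the length of our desired substring
--     RETURN:
--     The function returns the list 'desired_substr_list' which is our desired
--     substring in the form of a list.
--     '''
--     assert length <= len(string), 'Desired substring length longer than length of the string'
--     assert start <= len(string), 'Start position not specified in the string'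
--     str_list = []
--     desired_substr_list = []
--     for char in string: str_list.append(char.lower())
--     for char in string: str_list.append(char.lower())
--     for i in range(start, (start + length)):
--         desired_substr_list.append(str_list[i])
--     return desired_substr_list
-- ===== SOURCE B (Python) =====
-- def generate_substr_p(string, start, length):
--     assert length <= len(string), 'Desired substring length longer than length of the string'
--     assert start <= len(string), 'Start position not specified in the string'
--     if length <= 0:
--         return []
--     lowered = [c.lower() for c in string]
--     s = start % len(string)
--     return (lowered[s:] + lowered[:s])[:length]
-- ===== Notes on version B (the rewrite author's own statement) =====
-- stated objective: simpler
-- what changed: Replaces A's doubled lowered list and per-index append loop by a rotate-and-truncate on whole slices: normalise the start once with one modulo, rotate the lowered list by two slices, and take the first `length` elements; no per-element index loop remains.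
import Mathlib
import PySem

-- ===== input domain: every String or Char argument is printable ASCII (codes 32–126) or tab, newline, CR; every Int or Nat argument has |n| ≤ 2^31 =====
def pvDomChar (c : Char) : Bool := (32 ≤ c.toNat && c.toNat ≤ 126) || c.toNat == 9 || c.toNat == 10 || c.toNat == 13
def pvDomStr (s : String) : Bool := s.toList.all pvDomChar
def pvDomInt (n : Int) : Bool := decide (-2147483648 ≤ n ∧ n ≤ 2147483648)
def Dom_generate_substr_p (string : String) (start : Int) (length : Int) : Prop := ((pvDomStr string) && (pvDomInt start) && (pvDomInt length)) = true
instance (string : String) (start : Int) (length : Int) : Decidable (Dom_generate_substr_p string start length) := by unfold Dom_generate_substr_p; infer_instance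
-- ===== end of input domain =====

-- B replaces A's doubled lowered list and per-index append loop by rotate-and-truncate on
-- whole slices (one modulo to normalise the start, two slices, one take); objective: simpler.

-- ===== PORT A =====
-- A: build str_list by appending char.lower() twice over the string, then append str_list[i]
-- for i in range(start, start+length).  (Asserts/IndexError are excluded by Pre_.)
def generate_substr_p (string : String) (start : Int) (length : Int) : List String :=
  let str_list : List String :=
    string.toList.foldl (fun acc ch => acc ++ [PySem.Str.lower (String.ofList [ch])]) []
  let str_list : List String :=
    string.toList.foldl (fun acc ch => acc ++ [PySem.Str.lower (String.ofList [ch])]) str_list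
  (PySem.List.pyRange start (start + length) 1).foldl
    (fun acc i => acc ++ [PySem.List.pyGetD str_list i ""]) []

-- ===== PORT B =====
-- B: if length <= 0 return []; else lowered list, s = start % len(string),
-- (lowered[s:] + lowered[:s])[:length].
def generate_substr_p_alt (string : String) (start : Int) (length : Int) : List String :=
  if length ≤ 0 then []
  else
    let lowered : List String := string.toList.map (fun ch => PySem.Str.lower (String.ofList [ch]))
    let s : Int := PySem.Int.mod start (string.toList.length : Int)
    PySem.List.slice (PySem.List.slice lowered (some s) none ++ PySem.List.slice lowered none (some s)) none (some length)

-- ===== PRECONDITION & SPEC =====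
-- Pre_ is exactly the set of inputs on which the Python A returns normally: both asserts pass
-- (length ≤ len(string), start ≤ len(string)) and the doubled-list indexing does not raise
-- IndexError (which happens iff length > 0 and start < -2*len(string)).
def Pre_generate_substr_p (string : String) (start : Int) (length : Int) : Prop :=
  length ≤ (string.toList.length : Int) ∧ start ≤ (string.toList.length : Int) ∧
    (length ≤ 0 ∨ -(2 * (string.toList.length : Int)) ≤ start)
instance (string : String) (start : Int) (length : Int) : Decidable (Pre_generate_substr_p string start length) := by unfold Pre_generate_substr_p; infer_instance

def pvWitness_generate_substr_p : String × Int × Int := ("Ab", 1, 2)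

def Spec_generate_substr_p (string : String) (start : Int) (length : Int) (out : List String) : Prop := out = generate_substr_p_alt string start length
instance (string : String) (start : Int) (length : Int) (out : List String) : Decidable (Spec_generate_substr_p string start length out) := by unfold Spec_generate_substr_p; infer_instance

-- ===== CLAIM (what is proved, stated in full; the proofs are below) =====
def Claim_equal_generate_substr_p : Prop := ∀ (string : String) (start : Int) (length : Int), Dom_generate_substr_p string start length → Pre_generate_substr_p string start length → Spec_generate_substr_p string start length (generate_substr_p string start length)

-- ===== LEMMAS AND PROOFS =====

theorem pv_cast_mod (a b : Nat) : ((a % b : Nat) : Int) = (a:Int) % (b:Int) := by exact_mod_cast rfl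

-- Indexing a doubled list at k < 2n is indexing the list at k % n.
theorem pv_double_get {α : Type} (L : List α) (k : Nat) (hk : k < L.length + L.length) :
    (L ++ L)[k]? = L[k % L.length]? := by
  rcases Nat.lt_or_ge k L.length with h | h
  · rw [List.getElem?_append_left h, Nat.mod_eq_of_lt h]
  · rw [List.getElem?_append_right h]
    congr 1
    rw [Nat.mod_eq_sub_mod h, Nat.mod_eq_of_lt (by omega)]

-- Python indexing of the doubled list (negative wraparound included) is modular indexing.
theorem pv_wrap {α : Type} (L : List α) (i : Int) (d : α) (hn : 0 < L.length)
    (hlo : -(2 * (L.length : Int)) ≤ i) (hhi : i < 2 * (L.length : Int)) :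
    PySem.List.pyGetD (L ++ L) i d = PySem.List.pyGetD L (PySem.Int.mod i (L.length : Int)) d := by
  have hn' : (0:Int) < (L.length : Int) := by exact_mod_cast hn
  rw [PySem.Int.mod_eq_emod_of_pos hn']
  have h0 : 0 ≤ i % (L.length : Int) := Int.emod_nonneg _ (by omega)
  have h1 : i % (L.length : Int) < (L.length : Int) := Int.emod_lt_of_pos _ hn'
  rw [PySem.List.pyGetD_eq_getElem L d h0 h1]
  simp only [PySem.List.pyGetD, PySem.List.pyGet?, PySem.List.pyIdx?, List.length_append]
  rcases Decidable.em (0 ≤ i) with hpos | hneg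
  · rw [if_pos hpos, if_pos (by push_cast; omega)]
    have hk : i.toNat < L.length + L.length := by omega
    have hmod : i.toNat % L.length = (i % (L.length : Int)).toNat := by
      have : ((i.toNat % L.length : Nat) : Int) = i % (L.length : Int) := by
        rw [pv_cast_mod]
        rw [Int.toNat_of_nonneg hpos]
      omega
    simp [pv_double_get L i.toNat hk, hmod, List.getElem?_eq_getElem (by omega : (i % (L.length:Int)).toNat < L.length)]
  · rw [if_neg (by omega), if_pos (by push_cast; omega)]
    set k : Nat := L.length + L.length - (-i).toNat with hkdef
    have hkc : (k : Int) = 2 * (L.length : Int) + i := by omega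
    have hk : k < L.length + L.length := by omega
    have hmod : k % L.length = (i % (L.length : Int)).toNat := by
      have : ((k % L.length : Nat) : Int) = i % (L.length : Int) := by
        rw [pv_cast_mod, hkc]
        conv_rhs => rw [show i = i + (L.length : Int) * 2 - 2 * (L.length : Int) by ring]
        rw [show (2:Int) * (L.length : Int) + i = i + (L.length : Int) * 2 by ring,
            Int.add_mul_emod_self_left]
        ring_nf
      omega
    simp [pv_double_get L k hk, hmod, List.getElem?_eq_getElem (by omega : (i % (L.length:Int)).toNat < L.length)]

-- ===== VERDICT (by name: the statement is the Claim_ definition above) =====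
theorem generate_substr_p_spec : Claim_equal_generate_substr_p := by
  intro string start length _ hpre
  obtain ⟨hlen, hstart, hcase⟩ := hpre
  unfold Spec_generate_substr_p generate_substr_p generate_substr_p_alt
  simp only [PySem.List.foldl_append_singleton_eq_map, List.nil_append]
  set L : List String := string.toList.map (fun ch => PySem.Str.lower (String.ofList [ch])) with hL
  have hLlen : L.length = string.toList.length := by simp [hL]
  rcases Decidable.em (length ≤ 0) with hle | hpos
  · rw [if_pos hle, PySem.List.pyRange_one_eq_nil (by omega)]
    simp
  · rw [if_neg hpos]
    have hn : 0 < L.length := by omega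
    have hnI : (0:Int) < (string.toList.length : Int) := by omega
    set nI : Int := (string.toList.length : Int) with hnIdef
    have hlo : -(2 * nI) ≤ start := by
      rcases hcase with h | h
      · omega
      · exact h
    set s : Int := PySem.Int.mod start nI with hsdef
    have hs0 : 0 ≤ s := PySem.Int.mod_nonneg start hnI
    have hs1 : s < nI := PySem.Int.mod_lt start hnI
    rw [PySem.List.slice_from L hs0, PySem.List.slice_to L hs0,
        PySem.List.slice_to _ (by omega : (0:Int) ≤ length),
        PySem.List.pyRange_one, List.map_map]
    have hsub : (start + length - start).toNat = length.toNat := by omega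
    rw [hsub]
    apply List.ext_getElem
    · simp only [List.length_map, List.length_range, List.length_take, List.length_append,
        List.length_drop, hLlen]
      omega
    · intro k hk1 hk2
      simp only [List.getElem_map, List.getElem_range, Function.comp_apply]
      have hkm : k < length.toNat := by simpa using hk1
      have hwrap := pv_wrap L (start + (k:Int)) "" hn
        (by rw [hLlen]; omega) (by rw [hLlen]; omega)
      rw [hLlen] at hwrap
      rw [hwrap]
      have hmodsum : PySem.Int.mod (start + (k:Int)) nI = PySem.Int.mod (s + (k:Int)) nI := by
        rw [PySem.Int.mod_eq_emod_of_pos hnI, PySem.Int.mod_eq_emod_of_pos hnI]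
        have hdec := Int.mul_ediv_add_emod start nI
        conv_lhs => rw [show start + (k:Int) = s + (k:Int) + nI * (start / nI) by
          rw [hsdef, PySem.Int.mod_eq_emod_of_pos hnI]; linarith]
        rw [Int.add_mul_emod_self_left]
      rw [hmodsum]
      rcases Decidable.em (s + (k:Int) < nI) with hlt | hge
      · have hmv : PySem.Int.mod (s + (k:Int)) nI = s + (k:Int) := by
          rw [PySem.Int.mod_eq_emod_of_pos hnI, Int.emod_eq_of_lt (by omega) hlt]
        have hb2 : s + (k:Int) < (L.length : Int) := by rw [hLlen]; omega
        rw [hmv, PySem.List.pyGetD_eq_getElem L "" (by omega) hb2,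
            List.getElem_take, List.getElem_append_left (by simp only [List.length_drop, hLlen]; omega),
            List.getElem_drop]
        congr 1
        omega
      · have hge' : nI ≤ s + (k:Int) := by omega
        have hmv : PySem.Int.mod (s + (k:Int)) nI = s + (k:Int) - nI := by
          rw [PySem.Int.mod_eq_emod_of_pos hnI, ← Int.sub_emod_right (s + (k:Int)) nI,
              Int.emod_eq_of_lt (by omega) (by omega)]
        have hb2 : s + (k:Int) - nI < (L.length : Int) := by rw [hLlen]; omega
        rw [hmv, PySem.List.pyGetD_eq_getElem L "" (by omega) hb2,
            List.getElem_take, List.getElem_append_right (by simp only [List.length_drop, hLlen]; omega),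
            List.getElem_take]
        congr 1
        simp only [List.length_drop, hLlen]
        omega
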